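-- pv_equiv track=rewrite | github.com/aymak91/HackerRankSolutions | 2023/2023-10-30/maximize_revenue.py | getMaximumAmount
-- ===== SOURCE A (Python) =====
-- import heapq
--
-- def getMaximumAmount(quantity, m):
--     # Create a heap to store the quantities in descending order
--     heap = list()
--     res = 0
--
--     # Push the quantities onto the heap with their corresponding indices
--     for idx, q in enumerate(quantity):
--         # since heapq is a min heap we make the values negative so it will still give us the "biggest" int
--         # we're tricking it into behaving like a max heap since thats what we need
--         heapq.heappush(heap, (-q, idx))
--
--     # Pop the m largest quantities from the heap and update the result
--     for _ in range(m):
--         q, idx = heapq.heappop(heap)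
--         # since q is negative we need to turn it into a positive value
--         res += abs(q)
--
--         # If the quantity is not zero, push it back onto the heap with an incremented value
--         # since q should always be negative, we add to it to get it towards zero
--         if q + 1 != 0:
--             heapq.heappush(heap, (q+1, idx))
--
--     return res
-- ===== SOURCE B (Python) =====
-- def getMaximumAmount(quantity, m):
--     # Sell the m most expensive units: an item with stock q offers units priced q, q-1, ..., 1.
--     # Sort stocks descending and sell whole price bands at a time with arithmetic-series sums.
--     if m <= 0:
--         return 0
--     levels = sorted((q for q in quantity if q > 0), reverse=True)
--     levels.append(0)
--     res = 0
--     for i in range(len(levels) - 1):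
--         cur, nxt = levels[i], levels[i + 1]
--         cnt = i + 1                      # items currently priced at cur
--         band = cnt * (cur - nxt)         # units on sale at prices in (nxt, cur]
--         if m < band:
--             full, part = divmod(m, cnt)
--             return res + cnt * (full * (2 * cur - full + 1) // 2) + part * (cur - full)
--         res += cnt * ((cur + nxt + 1) * (cur - nxt) // 2)
--         m -= band
--     return res
-- ===== Notes on version B (the rewrite author's own statement) =====
-- stated objective: faster
-- what changed: A simulates every single pick with a heap (one heappop/heappush per unit of m); B sorts the positive stocks once and sells whole price bands in closed form with arithmetic-series sums, so the cost no longer depends on m.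
-- intended difference: On inputs where some quantity is <= 0 and m exceeds the total sellable stock (sum of positive quantities, plus the zero-stock items which yield nothing), A keeps popping exhausted or negative entries and adds ever-growing fictitious revenues to its total, while B returns the revenue of all genuinely sellable units, which is the intended value. — e.g. on getMaximumAmount([2, 0], 4): A returns 4, B returns 3
import Mathlib
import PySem

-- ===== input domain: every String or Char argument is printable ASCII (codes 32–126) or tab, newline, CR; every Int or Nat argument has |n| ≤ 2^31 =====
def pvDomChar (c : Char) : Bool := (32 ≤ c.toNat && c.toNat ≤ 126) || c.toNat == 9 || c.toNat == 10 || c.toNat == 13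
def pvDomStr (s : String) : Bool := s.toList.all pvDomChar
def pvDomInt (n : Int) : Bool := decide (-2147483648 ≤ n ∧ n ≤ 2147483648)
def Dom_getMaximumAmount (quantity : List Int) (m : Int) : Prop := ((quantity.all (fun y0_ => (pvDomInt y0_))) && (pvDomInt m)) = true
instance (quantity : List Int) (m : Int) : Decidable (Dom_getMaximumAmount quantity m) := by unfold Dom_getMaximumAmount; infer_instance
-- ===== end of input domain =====

-- B replaces A's pick-by-pick heap loop by sort-once + closed-form price-band sums (measured faster);
-- on inputs where m exceeds the sellable stock B returns the intended total instead of A's inflated one (see D_).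
-- ===== PORT A =====
-- heapq model: all pushed pairs are distinct, so heappop returns the unique lexicographic
-- minimum; a list kept sorted in (value, index) order is an observationally exact heap model.
def hpush (x : Int × Int) : List (Int × Int) → List (Int × Int)
  | [] => [x]
  | y :: t => if x.1 < y.1 ∨ (x.1 = y.1 ∧ x.2 ≤ y.2) then x :: y :: t else y :: hpush x t

def aLoop : Nat → List (Int × Int) → Int → Int
  | 0, _, res => res
  | k+1, h, res =>
    match h with
    | [] => res   -- Python: heappop raises IndexError here (excluded by Pre_)
    | (q, idx) :: t =>
      if q + 1 ≠ 0 then aLoop k (hpush (q + 1, idx) t) (res + |q|)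
      else aLoop k t (res + |q|)

def getMaximumAmount (quantity : List Int) (m : Int) : Int :=
  let heap := (PySem.List.enumerate quantity).foldl (fun h p => hpush (-p.2, p.1) h) []
  aLoop m.toNat heap 0   -- range(m) is empty for m ≤ 0, hence toNat

-- ===== PORT B =====
-- `for i in range(len(levels)-1)` over consecutive pairs of levels, with cnt = i + 1
-- carried as an accumulator and `m` decremented in place as in Source B
def bLoop : Int → List Int → Int → Int → Int
  | _, [], _, res => res
  | _, [_], _, res => res
  | cnt, cur :: nxt :: t, m, res =>
    let band := cnt * (cur - nxt)
    if m < band then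
      let full := PySem.Int.floordiv m cnt
      let part := PySem.Int.mod m cnt
      res + cnt * (PySem.Int.floordiv (full * (2 * cur - full + 1)) 2) + part * (cur - full)
    else
      bLoop (cnt + 1) (nxt :: t) (m - band)
        (res + cnt * (PySem.Int.floordiv ((cur + nxt + 1) * (cur - nxt)) 2))

def getMaximumAmount_alt (quantity : List Int) (m : Int) : Int :=
  if m ≤ 0 then 0
  else
    let levels := (PySem.List.sorted (quantity.filter (fun q => decide (0 < q))) (fun x => x) true) ++ [0]
    bLoop 1 levels m 0

-- ===== PRECONDITION & SPEC =====
-- Pre_ excludes exactly the inputs on which Python A raises IndexError (heap exhausted):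
-- no non-positive quantity and m larger than the total supply of positive quantities.
def Pre_getMaximumAmount (quantity : List Int) (m : Int) : Prop :=
  (∃ q ∈ quantity, q ≤ 0) ∨ m ≤ (quantity.filter (fun q => decide (0 < q))).sum
instance (quantity : List Int) (m : Int) : Decidable (Pre_getMaximumAmount quantity m) := by
  unfold Pre_getMaximumAmount; infer_instance
def pvWitness_getMaximumAmount : List Int × Int := ([3, -1], 10)

-- On inputs where some quantity is ≤ 0 and m exceeds the total sellable stock (sum of positive
-- quantities, plus the zero-stock items which yield nothing), A keeps popping exhausted or negative
-- entries and adds ever-growing fictitious revenues, while B returns the revenue of all genuinely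
-- sellable units, which is the intended value.
def D_getMaximumAmount (quantity : List Int) (m : Int) : Prop :=
  (∃ q ∈ quantity, q ≤ 0) ∧
    (quantity.filter (fun q => decide (0 < q))).sum + (quantity.count 0 : Int) < m
instance (quantity : List Int) (m : Int) : Decidable (D_getMaximumAmount quantity m) := by
  unfold D_getMaximumAmount; infer_instance

def Spec_getMaximumAmount (quantity : List Int) (m : Int) (out : Int) : Prop :=
  ¬ D_getMaximumAmount quantity m → out = getMaximumAmount_alt quantity m
instance (quantity : List Int) (m : Int) (out : Int) : Decidable (Spec_getMaximumAmount quantity m out) := by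
  unfold Spec_getMaximumAmount; infer_instance

def pvDiffWitness_getMaximumAmount : List Int × Int := ([2, 0], 4)
def pvDiffWitnessOut_getMaximumAmount : Int × Int := (4, 3)

-- ===== CLAIM (what is proved, stated in full; the proofs are below) =====
def Claim_unchanged_getMaximumAmount : Prop := ∀ (quantity : List Int) (m : Int), Dom_getMaximumAmount quantity m → Pre_getMaximumAmount quantity m → Spec_getMaximumAmount quantity m (getMaximumAmount quantity m)
def Claim_changed_getMaximumAmount : Prop := Dom_getMaximumAmount (pvDiffWitness_getMaximumAmount.1) (pvDiffWitness_getMaximumAmount.2) ∧ Pre_getMaximumAmount (pvDiffWitness_getMaximumAmount.1) (pvDiffWitness_getMaximumAmount.2) ∧ D_getMaximumAmount (pvDiffWitness_getMaximumAmount.1) (pvDiffWitness_getMaximumAmount.2) ∧ getMaximumAmount (pvDiffWitness_getMaximumAmount.1) (pvDiffWitness_getMaximumAmount.2) = pvDiffWitnessOut_getMaximumAmount.1 ∧ getMaximumAmount_alt (pvDiffWitness_getMaximumAmount.1) (pvDiffWitness_getMaximumAmount.2) = pvDiffWitnessOut_getMaximumAmount.2 ∧ pvDiffWitnessOut_getMaximumAmount.1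 ≠ pvDiffWitnessOut_getMaximumAmount.2
def Claim_exact_getMaximumAmount : Prop := ∀ (quantity : List Int) (m : Int), Dom_getMaximumAmount quantity m → Pre_getMaximumAmount quantity m → D_getMaximumAmount quantity m → getMaximumAmount quantity m ≠ getMaximumAmount_alt quantity m

-- ===== LEMMAS AND PROOFS =====

-- the lexicographic order heapq maintains on the pushed pairs
def lexP (x y : Int × Int) : Prop := x.1 < y.1 ∨ (x.1 = y.1 ∧ x.2 ≤ y.2)

-- insertion into an ascending list of values
def insI (v : Int) (l : List Int) : List Int := List.orderedInsert (· ≤ ·) v l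

-- canonical value-level process: pop the minimum value v, earn |v|, put back v+1 unless it is 0
def proc : Nat → List Int → Int
  | 0, _ => 0
  | _+1, [] => 0
  | k+1, v :: t => |v| + (if v + 1 = 0 then proc k t else proc k (insI (v + 1) t))

-- |v| + |v+1| + … + |v+d-1|
def sumAbs : Int → Nat → Int
  | _, 0 => 0
  | v, d+1 => |v| + sumAbs (v + 1) d

lemma proc_nil (k : Nat) : proc k [] = 0 := by cases k <;> rfl

lemma lexP_total {x y : Int × Int} (h : ¬ lexP x y) : lexP y x := by
  unfold lexP at *; omega

lemma lexP_trans {x y z : Int × Int} (h1 : lexP x y) (h2 : lexP y z) : lexP x z := by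
  unfold lexP at *; omega

lemma insI_cons_le {v w : Int} {l : List Int} (h : v ≤ w) : insI v (w :: l) = v :: w :: l := by
  unfold insI; exact List.orderedInsert_cons_of_le _ _ h

lemma insI_cons_gt {v w : Int} {l : List Int} (h : ¬ v ≤ w) : insI v (w :: l) = w :: insI v l := by
  unfold insI; exact List.orderedInsert_of_not_le _ _ h

lemma ins_front {v : Int} {l : List Int} (h : ∀ w ∈ l, v ≤ w) : insI v l = v :: l := by
  cases l with
  | nil => rfl
  | cons x t => exact insI_cons_le (h x (by simp))

lemma ins_repl {u v : Int} (hvu : v < u) (c : Nat) (rest : List Int) :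
    insI u (List.replicate c v ++ rest) = List.replicate c v ++ insI u rest := by
  induction c with
  | zero => simp
  | succ c ih =>
      rw [List.replicate_succ, List.cons_append, insI_cons_gt (by omega), ih]
      simp

lemma repl_shift (c : Nat) (v : Int) (l : List Int) :
    List.replicate c v ++ v :: l = List.replicate (c + 1) v ++ l := by
  rw [List.replicate_succ', List.append_assoc]; rfl

lemma hpush_perm (x : Int × Int) (t : List (Int × Int)) : (hpush x t).Perm (x :: t) := by
  induction t with
  | nil => rfl
  | cons y t ih =>
      rw [hpush]
      split
      · rfl
      · exact (ih.cons y).trans (List.Perm.swap x y t)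

lemma hpush_pairwise (x : Int × Int) (t : List (Int × Int)) (ht : t.Pairwise lexP) :
    (hpush x t).Pairwise lexP := by
  induction t with
  | nil => simp [hpush]
  | cons y t ih =>
      rw [List.pairwise_cons] at ht
      rw [hpush]
      split
      · rename_i hxy
        refine List.Pairwise.cons ?_ (List.Pairwise.cons ht.1 ht.2)
        intro w hw
        rcases List.mem_cons.mp hw with rfl | hw
        · exact hxy
        · exact lexP_trans hxy (ht.1 w hw)
      · rename_i hxy
        refine List.Pairwise.cons ?_ (ih ht.2)
        intro w hw
        rcases List.mem_cons.mp ((hpush_perm x t).mem_iff.mp hw) with rfl | hw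
        · exact lexP_total hxy
        · exact ht.1 w hw

lemma map_fst_hpush (x : Int × Int) (t : List (Int × Int)) (ht : t.Pairwise lexP) :
    (hpush x t).map Prod.fst = insI x.1 (t.map Prod.fst) := by
  induction t with
  | nil => rfl
  | cons y t ih =>
      rw [List.pairwise_cons] at ht
      rw [hpush]
      split
      · rename_i hxy
        rw [List.map_cons, List.map_cons, insI_cons_le (show x.1 ≤ y.1 by omega)]
      · rename_i hxy
        rw [List.map_cons, List.map_cons, ih ht.2]
        by_cases hle : x.1 ≤ y.1
        · have h1 : x.1 = y.1 := by omega
          rw [insI_cons_le hle,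
            ins_front (by
              intro w hw
              rcases List.mem_map.mp hw with ⟨p, hp, rfl⟩
              have := ht.1 p hp
              unfold lexP at this; omega), h1]
        · rw [insI_cons_gt hle]

lemma aLoop_proc : ∀ (k : Nat) (h : List (Int × Int)) (res : Int), h.Pairwise lexP →
    aLoop k h res = res + proc k (h.map Prod.fst) := by
  intro k
  induction k with
  | zero => intro h res _; simp [aLoop, proc]
  | succ k ih =>
      intro h res hp
      cases h with
      | nil => simp [aLoop, proc_nil]
      | cons x t =>
          obtain ⟨q, idx⟩ := x
          rw [List.pairwise_cons] at hp
          rw [aLoop, List.map_cons]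
          by_cases h0 : q + 1 = 0
          · rw [if_neg (by omega), ih t _ hp.2, proc, if_pos h0]
            ring
          · rw [if_pos (by omega), ih _ _ (hpush_pairwise _ _ hp.2), proc, if_neg h0,
              map_fst_hpush _ _ hp.2]
            ring

lemma foldl_hpush_pairwise (f : Int × Int → Int × Int) (l : List (Int × Int)) :
    ∀ acc, acc.Pairwise lexP → (l.foldl (fun h p => hpush (f p) h) acc).Pairwise lexP := by
  induction l with
  | nil => intro acc h; simpa using h
  | cons x l ih => intro acc h; exact ih _ (hpush_pairwise _ _ h)

lemma foldl_hpush_perm (f : Int × Int → Int × Int) (l : List (Int × Int)) :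
    ∀ acc, (l.foldl (fun h p => hpush (f p) h) acc).Perm (l.map f ++ acc) := by
  induction l with
  | nil => intro acc; simp
  | cons x l ih =>
      intro acc
      refine (ih (hpush (f x) acc)).trans ?_
      refine ((hpush_perm (f x) acc).append_left (l.map f)).trans ?_
      simpa using List.perm_middle

lemma proc_partial : ∀ (n c : Nat) (v : Int) (rest : List Int), n ≤ c → (∀ w ∈ rest, v < w) →
    proc n (List.replicate c v ++ rest) = n * |v| := by
  intro n
  induction n with
  | zero => intro c v rest _ _; simp [proc]
  | succ n ih =>
      intro c v rest hn hr
      obtain ⟨c, rfl⟩ : ∃ c', c = c' + 1 := ⟨c - 1, by omega⟩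
      rw [List.replicate_succ, List.cons_append, proc]
      by_cases h0 : v + 1 = 0
      · rw [if_pos h0, ih c v rest (by omega) hr]
        push_cast; ring
      · rw [if_neg h0, ins_repl (by omega), ins_front (by intro w hw; have := hr w hw; omega),
          ih c v ((v+1) :: rest) (by omega) (by
            intro w hw
            rcases List.mem_cons.mp hw with rfl | hw
            · omega
            · exact hr w hw)]
        push_cast; ring

lemma proc_row : ∀ (c : Nat) (v : Int) (rest : List Int) (n : Nat), c ≤ n → v + 1 ≠ 0 →
    (∀ w ∈ rest, v < w) →
    proc n (List.replicate c v ++ rest) = c * |v| + proc (n - c) (List.replicate c (v + 1) ++ rest) := by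
  intro c
  induction c with
  | zero => intro v rest n _ _ _; simp
  | succ c ih =>
      intro v rest n hn h0 hr
      obtain ⟨n, rfl⟩ : ∃ n', n = n' + 1 := ⟨n - 1, by omega⟩
      rw [List.replicate_succ, List.cons_append, proc, if_neg h0,
        ins_repl (by omega), ins_front (by intro w hw; have := hr w hw; omega),
        ih v ((v+1) :: rest) n (by omega) h0 (by
          intro w hw
          rcases List.mem_cons.mp hw with rfl | hw
          · omega
          · exact hr w hw),
        repl_shift]
      have : n + 1 - (c + 1) = n - c := by omega
      rw [this]
      push_cast; ring

lemma proc_removal : ∀ (c : Nat) (rest : List Int) (n : Nat), c ≤ n →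
    proc n (List.replicate c (-1) ++ rest) = c + proc (n - c) rest := by
  intro c
  induction c with
  | zero => intro rest n _; simp
  | succ c ih =>
      intro rest n hn
      obtain ⟨n, rfl⟩ : ∃ n', n = n' + 1 := ⟨n - 1, by omega⟩
      rw [List.replicate_succ, List.cons_append, proc, if_pos (by norm_num),
        ih rest n (by omega)]
      have : n + 1 - (c + 1) = n - c := by omega
      rw [this]
      push_cast; norm_num; ring

lemma proc_band : ∀ (d c : Nat) (v : Int) (rest : List Int) (n : Nat), c * d ≤ n →
    (∀ j : Nat, j < d → v + j + 1 ≠ 0) → (∀ w ∈ rest, v + d ≤ w) →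
    proc n (List.replicate c v ++ rest)
      = c * sumAbs v d + proc (n - c * d) (List.replicate c (v + d) ++ rest) := by
  intro d
  induction d with
  | zero => intro c v rest n _ _ _; simp [sumAbs]
  | succ d ih =>
      intro c v rest n hn hj hr
      have hms : c * (d + 1) = c * d + c := Nat.mul_succ c d
      rw [proc_row c v rest n (by omega) (by have := hj 0 (by omega); simpa using this)
        (by intro w hw; have := hr w hw; push_cast at *; omega)]
      rw [ih c (v + 1) rest (n - c) (by omega) (by
          intro j hjd
          have := hj (j + 1) (by omega)
          push_cast at *; omega)
        (by intro w hw; have := hr w hw; push_cast at *; omega)]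
      have h1 : v + 1 + (d : Int) = v + ((d : Nat) + 1 : Nat) := by push_cast; ring
      have h2 : n - c - c * d = n - c * (d + 1) := by
        have : c * (d + 1) = c * d + c := by ring
        omega
      rw [h1, h2, sumAbs]
      push_cast; ring

lemma half_eq {X s : Int} (h : X = 2 * s) : PySem.Int.floordiv X 2 = s := by
  rw [PySem.Int.floordiv_eq_ediv_of_pos (by norm_num), h, Int.mul_ediv_cancel_left _ (by norm_num)]

lemma sumAbs_nonpos : ∀ (d : Nat) (v : Int), v + d ≤ 0 → 2 * sumAbs v d = d * (-(2 * v) - d + 1) := by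
  intro d
  induction d with
  | zero => intro v _; simp [sumAbs]
  | succ d ih =>
      intro v hv
      push_cast at hv
      rw [sumAbs, abs_of_nonpos (by omega)]
      have := ih (v + 1) (by omega)
      push_cast at *; ring_nf at *; linarith

lemma proc_finish (c : Nat) (v : Int) (rest : List Int) (rem : Int) (hc : 0 < c) (hrem : 0 ≤ rem)
    (hnot : ∀ j : Nat, (j : Int) < PySem.Int.floordiv rem c → v + j + 1 ≠ 0)
    (hrest : ∀ w ∈ rest, v + PySem.Int.floordiv rem c < w) :
    proc rem.toNat (List.replicate c v ++ rest)
      = c * sumAbs v (PySem.Int.floordiv rem c).toNat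
        + (PySem.Int.mod rem c) * |v + PySem.Int.floordiv rem c| := by
  have hc' : (0 : Int) < (c : Int) := by exact_mod_cast hc
  have hF : 0 ≤ PySem.Int.floordiv rem c := by
    rw [PySem.Int.floordiv_eq_ediv_of_pos hc']
    exact Int.ediv_nonneg hrem (le_of_lt hc')
  have hP0 : 0 ≤ PySem.Int.mod rem c := PySem.Int.mod_nonneg rem hc'
  have hPc : PySem.Int.mod rem c < c := PySem.Int.mod_lt rem hc'
  have hsum : PySem.Int.floordiv rem c * c + PySem.Int.mod rem c = rem :=
    PySem.Int.floordiv_mul_add_mod rem c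
  have hfN : ((PySem.Int.floordiv rem c).toNat : Int) = PySem.Int.floordiv rem c :=
    Int.toNat_of_nonneg hF
  have hpN : ((PySem.Int.mod rem c).toNat : Int) = PySem.Int.mod rem c :=
    Int.toNat_of_nonneg hP0
  set fN := (PySem.Int.floordiv rem c).toNat with hfdef
  set pN := (PySem.Int.mod rem c).toNat with hpdef
  have htot : rem.toNat = c * fN + pN := by
    have h1 : ((c * fN + pN : Nat) : Int) = rem := by
      push_cast [hfN, hpN]
      linarith [hsum, mul_comm (PySem.Int.floordiv rem c) (c : Int)]
    omega
  rw [proc_band fN c v rest rem.toNat (by omega)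
      (by intro j hj; exact hnot j (by omega))
      (by intro w hw; have := hrest w hw; omega),
    proc_partial (rem.toNat - c * fN) c (v + fN) rest (by omega)
      (by intro w hw; have := hrest w hw; omega)]
  have hrem2 : rem.toNat - c * fN = pN := by omega
  rw [hrem2, hfN, hpN]

-- the "spend the remaining m picks inside the current band of cN equal stocks" step
lemma finish_down (cN : Nat) (cur rem res : Int) (rest' : List Int) (hc : 0 < cN)
    (hrem : 0 ≤ rem) (hflt : PySem.Int.floordiv rem (cN : Int) < cur)
    (hrest : ∀ w ∈ rest', -cur + PySem.Int.floordiv rem (cN : Int) < w) :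
    res + (cN : Int) * (PySem.Int.floordiv
        (PySem.Int.floordiv rem (cN : Int) * (2 * cur - PySem.Int.floordiv rem (cN : Int) + 1)) 2)
      + (PySem.Int.mod rem (cN : Int)) * (cur - PySem.Int.floordiv rem (cN : Int))
    = res + proc rem.toNat (List.replicate cN (-cur) ++ rest') := by
  have hc' : (0 : Int) < (cN : Int) := by exact_mod_cast hc
  have hF : 0 ≤ PySem.Int.floordiv rem cN := by
    rw [PySem.Int.floordiv_eq_ediv_of_pos hc']
    exact Int.ediv_nonneg hrem (le_of_lt hc')
  have hfN : ((PySem.Int.floordiv rem cN).toNat : Int) = PySem.Int.floordiv rem cN :=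
    Int.toNat_of_nonneg hF
  rw [proc_finish cN (-cur) rest' rem hc hrem (by intro j hj; omega) hrest]
  rw [abs_of_nonpos (by omega : -cur + PySem.Int.floordiv rem (cN : Int) ≤ 0)]
  rw [half_eq (show PySem.Int.floordiv rem (cN:Int) * (2 * cur - PySem.Int.floordiv rem (cN:Int) + 1)
      = 2 * sumAbs (-cur) (PySem.Int.floordiv rem (cN:Int)).toNat by
    rw [sumAbs_nonpos _ (-cur) (by omega), hfN]; ring)]
  ring

-- proc never earns a negative amount
lemma proc_nonneg : ∀ (k : Nat) (l : List Int), 0 ≤ proc k l := by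
  intro k
  induction k with
  | zero => intro l; simp [proc]
  | succ k ih =>
      intro l
      cases l with
      | nil => simp [proc]
      | cons v t =>
          rw [proc]
          split_ifs with h0
          · have := ih t; positivity
          · have := ih (insI (v + 1) t); positivity

-- e ≤ z picks from z zero-stock items (everything else priced ≥ 1) earn nothing
lemma proc_zero_prefix : ∀ (e z : Nat) (tail : List Int), e ≤ z → (∀ w ∈ tail, 1 ≤ w) →
    proc e (List.replicate z 0 ++ tail) = 0 := by
  intro e
  induction e with
  | zero => intro z tail _ _; simp [proc]
  | succ e ih =>
      intro z tail he htail
      obtain ⟨z, rfl⟩ : ∃ z', z = z' + 1 := ⟨z - 1, by omega⟩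
      rw [List.replicate_succ, List.cons_append, proc, if_neg (by norm_num),
        ins_repl (by norm_num)]
      simp only [zero_add]
      rw [ih z (insI 1 tail) (by omega) (by
        intro w hw
        rcases List.mem_cons.mp ((List.perm_orderedInsert _ 1 tail).mem_iff.mp hw) with rfl | hw
        · exact le_refl _
        · exact htail w hw)]
      simp

-- more than z picks from a nonempty pool of zero- and negative-stock items earn something
lemma proc_pos : ∀ (e z : Nat) (tail : List Int), z < e → (∀ w ∈ tail, 1 ≤ w) →
    0 < z + tail.length → 1 ≤ proc e (List.replicate z 0 ++ tail) := by
  intro e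
  induction e with
  | zero => intro z tail h _ _; omega
  | succ e ih =>
      intro z tail he htail hne
      cases z with
      | zero =>
          cases tail with
          | nil => simp at hne
          | cons w t =>
              simp only [List.replicate, List.nil_append]
              rw [proc]
              have hw1 : 1 ≤ w := htail w (by simp)
              have habs : 1 ≤ |w| := by rw [abs_of_nonneg (by omega)]; omega
              split_ifs with h0
              · have := proc_nonneg e t; omega
              · have := proc_nonneg e (insI (w + 1) t); omega
      | succ z =>
          rw [List.replicate_succ, List.cons_append, proc, if_neg (by norm_num),
            ins_repl (by norm_num)]
          simp only [zero_add]
          have h1 := ih z (insI 1 tail) (by omega) (by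
            intro w hw
            rcases List.mem_cons.mp ((List.perm_orderedInsert _ 1 tail).mem_iff.mp hw) with rfl | hw
            · exact le_refl _
            · exact htail w hw) (by
            have h2 := (List.perm_orderedInsert (· ≤ ·) 1 tail).length_eq
            simp only [List.length_cons] at h2
            unfold insI; omega)
          simp only [abs_zero]
          omega

-- a sorted nonnegative list is a block of zeros followed by values ≥ 1
lemma lev_shape : ∀ (l : List Int), l.Pairwise (· ≤ ·) → (∀ x ∈ l, 0 ≤ x) →
    ∃ (z : Nat) (tail : List Int), l = List.replicate z 0 ++ tail ∧ (∀ w ∈ tail, 1 ≤ w) := by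
  intro l
  induction l with
  | nil => intro _ _; exact ⟨0, [], rfl, by simp⟩
  | cons x t ih =>
      intro hpw hnn
      by_cases hx : x = 0
      · obtain ⟨z, tail, hshape, htail⟩ := ih (List.Pairwise.of_cons hpw) (fun y hy => hnn y (by simp [hy]))
        exact ⟨z + 1, tail, by rw [List.replicate_succ, List.cons_append, ← hshape, hx], htail⟩
      · refine ⟨0, x :: t, by simp, ?_⟩
        intro w hw
        rcases List.mem_cons.mp hw with rfl | hw
        · have := hnn w (by simp); omega
        · have h1 := List.rel_of_pairwise_cons hpw hw
          have h2 := hnn x (by simp)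
          omega

-- B's band loop against the canonical process: early return ⇒ equal; fall-through ⇒ the
-- whole positive supply is earned and proc continues on the non-positive pool alone
lemma bLoop_proc : ∀ (rest : List Int) (cnt : Nat) (cur m res : Int) (lev : List Int),
    0 < cnt → 0 < cur → (∀ x ∈ rest, 0 < x ∧ x ≤ cur) → rest.Pairwise (fun a b => b ≤ a) →
    (∀ w ∈ lev, 0 ≤ w) → 0 ≤ m →
    res + proc m.toNat (List.replicate cnt (-cur) ++ rest.map (fun x => -x) ++ lev)
      = bLoop (cnt : Int) (cur :: rest ++ [0]) m res
        + (if (cnt : Int) * cur + rest.sum ≤ m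
            then proc (m - ((cnt : Int) * cur + rest.sum)).toNat lev else 0) := by
  intro rest
  induction rest with
  | nil =>
      intro cnt cur m res lev hcnt hcur _ _ hlev hm
      have hc' : (0 : Int) < (cnt : Int) := by exact_mod_cast hcnt
      simp only [List.cons_append, List.nil_append, List.map_nil, List.sum_nil,
        List.append_nil, add_zero]
      rw [bLoop]
      dsimp only
      simp only [sub_zero, add_zero]
      split_ifs with hband hsup hsup
      · exfalso; omega
      · -- m < cnt*cur : partial band, early return
        have hflt : PySem.Int.floordiv m (cnt : Int) < cur := by
          rw [PySem.Int.floordiv_lt_iff_lt_mul hc']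
          nlinarith
        have := finish_down cnt cur m res lev hcnt hm hflt
          (by intro w hw; have := hlev w hw; omega)
        omega
      · -- m ≥ cnt*cur : full burn of the last band, then proc continues on lev
        rw [bLoop]
        have hd1 : (((cur - 1).toNat : Nat) : Int) = cur - 1 := by omega
        have hpe : (cnt : Int) * cur = ((cnt * cur.toNat : Nat) : Int) := by
          have h5 : ((cur.toNat : Nat) : Int) = cur := by omega
          push_cast [h5]; ring
        have hb2 : cnt * (cur - 1).toNat ≤ m.toNat := by
          have h3 : cnt * (cur - 1).toNat ≤ cnt * cur.toNat :=
            Nat.mul_le_mul_left _ (by omega)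
          omega
        rw [proc_band ((cur - 1).toNat) cnt (-cur) lev m.toNat hb2
            (by intro j hj; omega)
            (by intro w hw; have := hlev w hw; omega)]
        have hm1 : -cur + (((cur - 1).toNat : Nat) : Int) = -1 := by omega
        have h4 : cnt * cur.toNat = cnt * (cur - 1).toNat + cnt := by
          have : cur.toNat = (cur - 1).toNat + 1 := by omega
          rw [this, Nat.mul_succ]
        rw [hm1, proc_removal cnt lev _ (by omega)]
        have hfuel : m.toNat - cnt * (cur - 1).toNat - cnt = (m - (cnt : Int) * cur).toNat := by
          omega
        rw [hfuel,
          half_eq (show (cur + 1) * cur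
              = 2 * (sumAbs (-cur) ((cur - 1).toNat) + 1) by
            have h6 := sumAbs_nonpos ((cur - 1).toNat) (-cur) (by omega)
            rw [hd1] at h6
            linear_combination -h6)]
        ring
      · exfalso; omega
  | cons nxt t ih =>
      intro cnt cur m res lev hcnt hcur hmem hpw hlev hm
      have hc' : (0 : Int) < (cnt : Int) := by exact_mod_cast hcnt
      have hnxt : 0 < nxt ∧ nxt ≤ cur := hmem nxt (by simp)
      have htmem : ∀ x ∈ t, 0 < x ∧ x ≤ nxt := by
        intro x hx
        exact ⟨(hmem x (by simp [hx])).1, List.rel_of_pairwise_cons hpw hx⟩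
      have htsum : 0 ≤ t.sum := List.sum_nonneg (by intro x hx; have := (htmem x hx).1; omega)
      simp only [List.cons_append]
      rw [bLoop]
      dsimp only
      by_cases hband : m < (cnt : Int) * (cur - nxt)
      · -- partial band: early return, and the whole supply is not reached
        rw [if_pos hband, if_neg (by simp only [List.sum_cons]; nlinarith)]
        have := finish_down cnt cur m res ((nxt :: t).map (fun x => -x) ++ lev) hcnt hm
          (by
            rw [PySem.Int.floordiv_lt_iff_lt_mul hc']
            nlinarith)
          (by
            intro w hw
            have hflt : PySem.Int.floordiv m (cnt : Int) < cur - nxt := by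
              rw [PySem.Int.floordiv_lt_iff_lt_mul hc']
              nlinarith
            rcases List.mem_append.mp hw with hw | hw
            · rcases List.mem_map.mp hw with ⟨x, hx, rfl⟩
              rcases List.mem_cons.mp hx with rfl | hx'
              · omega
              · have := (htmem x hx').2; omega
            · have := hlev w hw
              have : PySem.Int.floordiv m (cnt : Int) < cur := by
                rw [PySem.Int.floordiv_lt_iff_lt_mul hc']
                nlinarith
              omega)
        rw [← List.append_assoc] at this
        omega
      · -- full band down to nxt, then recurse
        rw [if_neg hband]
        have hdT : (((cur - nxt).toNat : Nat) : Int) = cur - nxt := by omega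
        have hpe : (cnt : Int) * (cur - nxt) = ((cnt * (cur - nxt).toNat : Nat) : Int) := by
          push_cast [hdT]; ring
        have hb2 : cnt * (cur - nxt).toNat ≤ m.toNat := by omega
        rw [List.append_assoc,
          proc_band ((cur - nxt).toNat) cnt (-cur) ((nxt :: t).map (fun x => -x) ++ lev)
            m.toNat hb2
            (by intro j hj; omega)
            (by
              intro w hw
              rcases List.mem_append.mp hw with hw | hw
              · rcases List.mem_map.mp hw with ⟨x, hx, rfl⟩
                rcases List.mem_cons.mp hx with rfl | hx'
                · omega
                · have := (htmem x hx').2; omega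
              · have := hlev w hw; omega)]
        have hmn : -cur + (((cur - nxt).toNat : Nat) : Int) = -nxt := by omega
        have hfuel : m.toNat - cnt * (cur - nxt).toNat = (m - (cnt : Int) * (cur - nxt)).toNat := by
          omega
        rw [hmn, hfuel, List.map_cons, ← List.append_assoc, ← List.cons_append, repl_shift,
          List.append_assoc]
        have hcast : ((cnt : Int) + 1) = ((cnt + 1 : Nat) : Int) := by push_cast; ring
        have hrec := ih (cnt + 1) nxt (m - (cnt : Int) * (cur - nxt))
          (res + (cnt : Int) * (PySem.Int.floordiv ((cur + nxt + 1) * (cur - nxt)) 2)) lev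
          (by omega) hnxt.1 htmem (List.Pairwise.of_cons hpw) hlev (by omega)
        simp only [List.cons_append] at hrec
        have harg : m - (cnt : Int) * (cur - nxt) - (((cnt + 1 : Nat) : Int) * nxt + t.sum)
            = m - ((cnt : Int) * cur + (nxt :: t).sum) := by
          simp only [List.sum_cons]; push_cast; ring
        have hiff : (((cnt + 1 : Nat) : Int) * nxt + t.sum ≤ m - (cnt : Int) * (cur - nxt))
            ↔ ((cnt : Int) * cur + (nxt :: t).sum ≤ m) := by
          constructor <;> intro h <;> linarith [harg]
        have hhalf : PySem.Int.floordiv ((cur + nxt + 1) * (cur - nxt)) 2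
            = sumAbs (-cur) ((cur - nxt).toNat) :=
          half_eq (by rw [sumAbs_nonpos _ (-cur) (by omega), hdT]; ring)
        rw [← List.append_assoc, hcast]
        rw [hhalf] at hrec ⊢
        simp only [hiff, harg] at hrec
        simp only [List.cons_append]
        linarith [hrec]


-- the initial heap's value column is exactly sorted(-q for q in quantity):
-- descending positives negated, then the negated non-positives ascending
lemma heap0_fst (quantity : List Int) :
    ((PySem.List.enumerate quantity).foldl (fun h p => hpush (-p.2, p.1) h) []).map Prod.fst
      = (PySem.List.sorted (quantity.filter (fun q => decide (0 < q))) (fun x => x) true).map (fun x => -x)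
        ++ PySem.List.sorted ((quantity.filter (fun q => decide (q ≤ 0))).map (fun q => -q)) (fun x => x) false := by
  have hhp : (((PySem.List.enumerate quantity).foldl (fun h p => hpush (-p.2, p.1) h) []) : List (Int × Int)).Pairwise lexP :=
    foldl_hpush_pairwise (fun p => (-p.2, p.1)) (PySem.List.enumerate quantity) [] List.Pairwise.nil
  have hperm1 : (((PySem.List.enumerate quantity).foldl (fun h p => hpush (-p.2, p.1) h) []).map Prod.fst).Perm
      (quantity.map (fun q => -q)) := by
    have h := (foldl_hpush_perm (fun p => (-p.2, p.1)) (PySem.List.enumerate quantity) []).map Prod.fst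
    rw [List.append_nil, List.map_map] at h
    refine h.trans ?_
    have he : (Prod.fst ∘ fun p : Int × Int => (-p.2, p.1)) = (fun q : Int => -q) ∘ (fun p : Int × Int => p.2) := rfl
    rw [he, ← List.map_map, PySem.List.map_snd_enumerate]
  have hperm2 : (((PySem.List.sorted (quantity.filter (fun q => decide (0 < q))) (fun x => x) true).map (fun x => -x))
      ++ PySem.List.sorted ((quantity.filter (fun q => decide (q ≤ 0))).map (fun q => -q)) (fun x => x) false).Perm
      (quantity.map (fun q => -q)) := by
    have hp1 := (PySem.List.sorted_perm (quantity.filter (fun q => decide (0 < q))) (fun x => x) true).map (fun x : Int => -x)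
    have hp2 := PySem.List.sorted_perm ((quantity.filter (fun q => decide (q ≤ 0))).map (fun q => -q)) (fun x => x) false
    refine (hp1.append hp2).trans ?_
    rw [← List.map_append]
    refine List.Perm.map _ ?_
    have hfc : quantity.filter (fun q => decide (q ≤ 0)) = quantity.filter (fun x => !(fun q => decide (0 < q)) x) :=
      List.filter_congr (by intro x _; by_cases h : 0 < x <;> simp [h]; omega)
    rw [hfc]
    exact List.filter_append_perm _ _
  have hs1 : (((PySem.List.enumerate quantity).foldl (fun h p => hpush (-p.2, p.1) h) []).map Prod.fst).Pairwise
      (fun a b : Int => a ≤ b) :=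
    hhp.map Prod.fst (by intro a b hab; unfold lexP at hab; omega)
  have hs2 : (((PySem.List.sorted (quantity.filter (fun q => decide (0 < q))) (fun x => x) true).map (fun x => -x))
      ++ PySem.List.sorted ((quantity.filter (fun q => decide (q ≤ 0))).map (fun q => -q)) (fun x => x) false).Pairwise
      (fun a b : Int => a ≤ b) := by
    rw [List.pairwise_append]
    refine ⟨?_, ?_, ?_⟩
    · refine (PySem.List.sorted_pairwise_rev _ _).map _ ?_
      intro a b hab
      simpa using hab
    · exact PySem.List.sorted_pairwise _ _
    · intro a ha b hb
      rcases List.mem_map.mp ha with ⟨x, hx, rfl⟩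
      have hx1 : 0 < x := by
        have h1 := (PySem.List.mem_sorted _ _ _ _).mp hx
        have h2 := List.mem_filter.mp h1
        simpa using h2.2
      have hb1 : 0 ≤ b := by
        have h1 := (PySem.List.mem_sorted _ _ _ _).mp hb
        rcases List.mem_map.mp h1 with ⟨y, hy, rfl⟩
        have h2 := List.mem_filter.mp hy
        have h3 : y ≤ 0 := by simpa using h2.2
        omega
      omega
  exact PySem.List.eq_of_perm_of_pairwise_le_of_injective (fun x => x) (fun a b h => h)
    (hperm1.trans hperm2.symm) hs1 hs2

-- the non-positive pool: every element ≥ 0, ascending, and its zeros count the zeros of quantity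
lemma lev_nonneg (quantity : List Int) :
    ∀ w ∈ PySem.List.sorted ((quantity.filter (fun q => decide (q ≤ 0))).map (fun q => -q)) (fun x => x) false, 0 ≤ w := by
  intro w hw
  have h1 := (PySem.List.mem_sorted _ _ _ _).mp hw
  rcases List.mem_map.mp h1 with ⟨y, hy, rfl⟩
  have h2 := List.mem_filter.mp hy
  have h3 : y ≤ 0 := by simpa using h2.2
  omega

lemma lev_count (quantity : List Int) :
    (PySem.List.sorted ((quantity.filter (fun q => decide (q ≤ 0))).map (fun q => -q)) (fun x => x) false).count 0
      = quantity.count 0 := by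
  rw [(PySem.List.sorted_perm _ _ _).count_eq]
  have h1 : ((quantity.filter (fun q => decide (q ≤ 0))).map (fun q => -q)).count (-(0:Int))
      = (quantity.filter (fun q => decide (q ≤ 0))).count 0 :=
    List.count_map_of_injective _ _ neg_injective 0
  rw [neg_zero] at h1
  rw [h1, List.count_filter (by norm_num)]

-- A's heap run equals B plus the canonical process on the non-positive pool
-- (the second summand only when m exhausts the positive supply)
lemma A_decomp (quantity : List Int) (m : Int) (hm : 0 < m) :
    getMaximumAmount quantity m
      = getMaximumAmount_alt quantity m
        + (if (quantity.filter (fun q => decide (0 < q))).sum ≤ m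
            then proc (m - (quantity.filter (fun q => decide (0 < q))).sum).toNat
                (PySem.List.sorted ((quantity.filter (fun q => decide (q ≤ 0))).map (fun q => -q)) (fun x => x) false)
            else 0) := by
  unfold getMaximumAmount getMaximumAmount_alt
  dsimp only
  rw [if_neg (by omega)]
  have hhp : (((PySem.List.enumerate quantity).foldl (fun h p => hpush (-p.2, p.1) h) []) : List (Int × Int)).Pairwise lexP :=
    foldl_hpush_pairwise (fun p => (-p.2, p.1)) (PySem.List.enumerate quantity) [] List.Pairwise.nil
  rw [aLoop_proc m.toNat _ 0 hhp, heap0_fst quantity, zero_add]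
  have hsum : (PySem.List.sorted (quantity.filter (fun q => decide (0 < q))) (fun x => x) true).sum
      = (quantity.filter (fun q => decide (0 < q))).sum :=
    (PySem.List.sorted_perm _ _ _).sum_eq
  have hpos : ∀ x ∈ PySem.List.sorted (quantity.filter (fun q => decide (0 < q))) (fun x => x) true, 0 < x := by
    intro x hx
    have h1 := (PySem.List.mem_sorted _ _ _ _).mp hx
    have h2 := List.mem_filter.mp h1
    simpa using h2.2
  have hpw := PySem.List.sorted_pairwise_rev (quantity.filter (fun q => decide (0 < q))) (fun x : Int => x)
  cases hc : PySem.List.sorted (quantity.filter (fun q => decide (0 < q))) (fun x => x) true with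
  | nil =>
      rw [hc] at hsum
      simp only [List.sum_nil] at hsum
      rw [← hsum]
      simp only [List.map_nil, List.nil_append, bLoop]
      rw [if_pos (by omega), sub_zero, zero_add]
  | cons p ps =>
      rw [hc] at hsum hpos hpw
      have hrec := bLoop_proc ps 1 p m 0
        (PySem.List.sorted ((quantity.filter (fun q => decide (q ≤ 0))).map (fun q => -q)) (fun x => x) false)
        (by omega) (hpos p (by simp))
        (by intro x hx; exact ⟨hpos x (by simp [hx]), List.rel_of_pairwise_cons hpw hx⟩)
        (List.Pairwise.of_cons hpw) (lev_nonneg quantity) (by omega)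
      simp only [List.replicate_one, List.singleton_append, Nat.cast_one, one_mul, zero_add] at hrec
      simp only [List.map_cons]
      rw [hrec]
      rw [List.sum_cons] at hsum
      rw [← hsum]

-- ===== VERDICT (by name: the statement is the Claim_ definition above) =====
theorem getMaximumAmount_spec : Claim_unchanged_getMaximumAmount := by
  intro quantity m _hdom hpre
  unfold Spec_getMaximumAmount
  intro hnD
  by_cases hm : m ≤ 0
  · unfold getMaximumAmount getMaximumAmount_alt
    dsimp only
    rw [if_pos hm, Int.toNat_of_nonpos hm]
    rfl
  · rw [A_decomp quantity m (by omega)]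
    split_ifs with hsup
    · obtain ⟨z, tail, hshape, htail⟩ := lev_shape
        (PySem.List.sorted ((quantity.filter (fun q => decide (q ≤ 0))).map (fun q => -q)) (fun x => x) false)
        (PySem.List.sorted_pairwise _ _) (lev_nonneg quantity)
      have hz : z = quantity.count 0 := by
        have h1 := lev_count quantity
        rw [hshape, List.count_append, List.count_replicate] at h1
        rw [List.count_eq_zero.mpr (by intro h; have := htail 0 h; omega)] at h1
        simp at h1
        omega
      have hM : m ≤ (quantity.filter (fun q => decide (0 < q))).sum + (quantity.count 0 : Int) := by
        unfold Pre_getMaximumAmount at hpre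
        unfold D_getMaximumAmount at hnD
        rcases hpre with hex | hle
        · by_contra hgt
          exact hnD ⟨hex, by omega⟩
        · have : (0 : Int) ≤ (quantity.count 0 : Int) := by positivity
          omega
      rw [hshape, proc_zero_prefix (m - (quantity.filter (fun q => decide (0 < q))).sum).toNat z tail
        (by omega) htail]
      ring
    · ring
theorem getMaximumAmount_changed : Claim_changed_getMaximumAmount := by
  unfold Claim_changed_getMaximumAmount; decide
theorem getMaximumAmount_tight : Claim_exact_getMaximumAmount := by
  intro quantity m _hdom _hpre hD
  obtain ⟨⟨q0, hq0m, hq0⟩, hlt⟩ := hD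
  have hsum0 : 0 ≤ (quantity.filter (fun q => decide (0 < q))).sum :=
    List.sum_nonneg (by intro x hx; have := List.mem_filter.mp hx; simp at this; omega)
  have hm : 0 < m := by
    have : (0 : Int) ≤ (quantity.count 0 : Int) := by positivity
    omega
  obtain ⟨z, tail, hshape, htail⟩ := lev_shape
    (PySem.List.sorted ((quantity.filter (fun q => decide (q ≤ 0))).map (fun q => -q)) (fun x => x) false)
    (PySem.List.sorted_pairwise _ _) (lev_nonneg quantity)
  have hz : z = quantity.count 0 := by
    have h1 := lev_count quantity
    rw [hshape, List.count_append, List.count_replicate] at h1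
    rw [List.count_eq_zero.mpr (by intro h; have := htail 0 h; omega)] at h1
    simp at h1
    omega
  have hlen : 0 < z + tail.length := by
    have hmem : (-q0) ∈ PySem.List.sorted ((quantity.filter (fun q => decide (q ≤ 0))).map (fun q => -q)) (fun x => x) false := by
      rw [PySem.List.mem_sorted]
      exact List.mem_map.mpr ⟨q0, List.mem_filter.mpr ⟨hq0m, by simpa using hq0⟩, rfl⟩
    rw [hshape] at hmem
    have := List.length_pos_of_mem hmem
    simp only [List.length_append, List.length_replicate] at this
    omega
  have hproc : 1 ≤ proc (m - (quantity.filter (fun q => decide (0 < q))).sum).toNat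
      (PySem.List.sorted ((quantity.filter (fun q => decide (q ≤ 0))).map (fun q => -q)) (fun x => x) false) := by
    rw [hshape]
    exact proc_pos _ z tail (by omega) htail hlen
  have := A_decomp quantity m hm
  rw [if_pos (by omega)] at this
  omega
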